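-- pv_equiv track=rewrite | github.com/oscarchang1226/hackerrank | leetcode/4sum-ii/solution.py | kSumCount
-- ===== SOURCE A (Python) =====
-- from typing import List
--
-- def kSumCount(lists: List[List[int]]) -> int:
--     m = {}
--
--     # This method populates the first half of lists into m
--     def addToHash(lists, idx, sum):
--         if idx == len(lists) // 2:
--             m[sum] = m.get(sum, 0) + 1
--         else:
--             for a in lists[idx]:
--                 addToHash(lists, idx + 1, sum + a)
--
--     def countComplements(lists, idx, complement):
--         # reach the end of the lists
--         if idx == len(lists):
--             return m.get(complement, 0)
--         else:
--             cnt = 0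
--             for b in lists[idx]:
--                 cnt += countComplements(lists, idx + 1, complement - b)
--             return cnt
--
--     addToHash(lists, 0, 0)
--     return countComplements(lists, len(lists) // 2, 0)
-- ===== SOURCE B (Python) =====
-- def kSumCount(lists):
--     h = len(lists) // 2
--     sums = [0]
--     for lst in lists[:h]:
--         sums = [s + a for s in sums for a in lst]
--     counter = {}
--     for s in sums:
--         counter[s] = counter.get(s, 0) + 1
--     rights = [0]
--     for lst in lists[h:]:
--         rights = [s + b for s in rights for b in lst]
--     total = 0
--     for r in rights:
--         total += counter.get(-r, 0)
--     return total
-- ===== Notes on version B (the rewrite author's own statement) =====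
-- stated objective: alternative
-- what changed: Replaces the two recursive DFS descents over the list halves (addToHash/countComplements) with iterative breadth-first enumeration: each half's Cartesian-product sums are built by repeatedly expanding a flat list of partial sums, then a counter dict is built in one pass and complements are summed in one pass.
import Mathlib
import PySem

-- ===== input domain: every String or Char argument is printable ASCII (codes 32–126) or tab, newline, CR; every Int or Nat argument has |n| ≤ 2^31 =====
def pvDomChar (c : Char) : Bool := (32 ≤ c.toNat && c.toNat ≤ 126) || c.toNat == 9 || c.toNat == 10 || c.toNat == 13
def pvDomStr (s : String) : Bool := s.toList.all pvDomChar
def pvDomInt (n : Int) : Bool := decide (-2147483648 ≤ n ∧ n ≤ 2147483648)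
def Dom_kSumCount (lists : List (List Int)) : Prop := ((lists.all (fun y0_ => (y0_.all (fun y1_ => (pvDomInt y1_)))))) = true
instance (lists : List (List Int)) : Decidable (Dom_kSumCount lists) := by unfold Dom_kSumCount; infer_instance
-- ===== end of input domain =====

-- B changes the algorithmic decomposition (iterative BFS product enumeration instead of two
-- recursive descents); same meet-in-the-middle strategy and cost, objective: alternative.

-- ===== PORT A =====
-- addToHash(lists, idx, sum): the idx counter walks exactly through lists[0:len//2],
-- so the port recurses structurally over that prefix (passed as `rest`).
def pvAddToHash : List (List Int) → Int → PySem.Dict Int Int → PySem.Dict Int Int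
  | [], s, m => m.insert s (m.getD s 0 + 1)
  | l :: rest, s, m => l.foldl (fun m a => pvAddToHash rest (s + a) m) m

-- countComplements(lists, idx, complement): idx walks through lists[len//2:].
def pvCountComplements : List (List Int) → Int → PySem.Dict Int Int → Int
  | [], c, m => m.getD c 0
  | l :: rest, c, m => l.foldl (fun cnt b => cnt + pvCountComplements rest (c - b) m) 0

def kSumCount (lists : List (List Int)) : Int :=
  let h := lists.length / 2
  let m := pvAddToHash (lists.take h) 0 PySem.Dict.empty
  pvCountComplements (lists.drop h) 0 m

-- ===== PORT B =====
def kSumCount_alt (lists : List (List Int)) : Int :=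
  let h := lists.length / 2
  let sums := (lists.take h).foldl
    (fun sums lst => sums.flatMap (fun s => lst.map (fun a => s + a))) [0]
  let counter := sums.foldl (fun c s => c.insert s (c.getD s 0 + 1)) PySem.Dict.empty
  let rights := (lists.drop h).foldl
    (fun rights lst => rights.flatMap (fun s => lst.map (fun b => s + b))) [0]
  rights.foldl (fun total r => total + counter.getD (-r) 0) 0

-- ===== PRECONDITION & SPEC =====
def Spec_kSumCount (lists : List (List Int)) (out : Int) : Prop := out = kSumCount_alt lists
instance (lists : List (List Int)) (out : Int) : Decidable (Spec_kSumCount lists out) := by unfold Spec_kSumCount; infer_instance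

-- ===== CLAIM (what is proved, stated in full; the proofs are below) =====
def Claim_equal_kSumCount : Prop := ∀ (lists : List (List Int)), Dom_kSumCount lists → Spec_kSumCount lists (kSumCount lists)

-- ===== LEMMAS AND PROOFS =====

-- canonical DFS-ordered list of all Cartesian-product sums of a list of lists
def prodSums : List (List Int) → List Int
  | [] => [0]
  | l :: ls => l.flatMap (fun a => (prodSums ls).map (fun p => a + p))

theorem foldl_flatMap' {α β γ : Type} (l : List α) (g : α → List β)
    (f : γ → β → γ) (b : γ) :
    l.foldl (fun b a => (g a).foldl f b) b = (l.flatMap g).foldl f b := by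
  induction l generalizing b with
  | nil => rfl
  | cons x xs ih => simp [List.flatMap_cons, List.foldl_append, ih]

theorem addToHash_eq (rest : List (List Int)) :
    ∀ (s : Int) (m : PySem.Dict Int Int),
    pvAddToHash rest s m =
      ((prodSums rest).map (fun p => s + p)).foldl
        (fun d x => d.insert x (d.getD x 0 + 1)) m := by
  induction rest with
  | nil => intro s m; simp [pvAddToHash, prodSums]
  | cons l r ih =>
    intro s m
    have step : (fun (m : PySem.Dict Int Int) (a : Int) => pvAddToHash r (s + a) m)
        = fun m a => ((prodSums r).map (fun p => (s + a) + p)).foldl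
            (fun d x => d.insert x (d.getD x 0 + 1)) m := by
      funext m a; exact ih (s + a) m
    show l.foldl (fun m a => pvAddToHash r (s + a) m) m = _
    rw [step, foldl_flatMap']
    simp [prodSums, List.map_flatMap, List.map_map, Function.comp_def, add_assoc]

theorem countComplements_eq (rest : List (List Int)) :
    ∀ (c : Int) (m : PySem.Dict Int Int),
    pvCountComplements rest c m = ((prodSums rest).map (fun p => m.getD (c - p) 0)).sum := by
  induction rest with
  | nil => intro c m; simp [pvCountComplements, prodSums]
  | cons l r ih =>
    intro c m
    show l.foldl (fun cnt b => cnt + pvCountComplements r (c - b) m) 0 = _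
    have step : (fun (cnt b : Int) => cnt + pvCountComplements r (c - b) m)
        = fun cnt b => cnt + ((prodSums r).map (fun p => m.getD ((c - b) - p) 0)).sum := by
      funext cnt b; rw [ih]
    rw [step, PySem.List.foldl_add]
    simp [prodSums, List.flatMap_def, List.sum_flatten, List.map_map, Function.comp_def,
      sub_sub]

theorem bfs_sums_eq (ls : List (List Int)) :
    ∀ (acc : List Int),
    ls.foldl (fun sums lst => sums.flatMap (fun s => lst.map (fun a => s + a))) acc
      = acc.flatMap (fun s => (prodSums ls).map (fun p => s + p)) := by
  induction ls with
  | nil => intro acc; simp [prodSums]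
  | cons l r ih =>
    intro acc
    rw [List.foldl_cons, ih]
    simp [prodSums, List.flatMap_assoc, List.flatMap_map, List.map_flatMap, List.map_map,
      Function.comp_def, add_assoc]

theorem kSumCount_eq_alt (lists : List (List Int)) :
    kSumCount lists = kSumCount_alt lists := by
  unfold kSumCount kSumCount_alt
  simp only [addToHash_eq, countComplements_eq, bfs_sums_eq, PySem.List.foldl_add]
  simp [zero_sub, zero_add]

-- ===== VERDICT (by name: the statement is the Claim_ definition above) =====
theorem kSumCount_spec : Claim_equal_kSumCount := by
  intro lists _
  show kSumCount lists = kSumCount_alt lists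
  exact kSumCount_eq_alt lists
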